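-- pv_equiv track=rewrite | github.com/eduryev/cvolume | cvolume/utils.py | stratum2print
-- ===== SOURCE A (Python) =====
-- from collections import Counter
--
-- def stratum2print(stratum):
--     if not stratum: return '[]'
--     stratum = Counter(stratum)
--     ans = ['[']
--     for order in sorted(stratum.keys(),reverse=True):
--         mult = stratum[order]
--         if mult == 1:
--             ans.extend([f'{order}',','])
--         else:
--             ans.extend([f'{order}^{mult}',','])
--     ans[-1] = ']'
--     return ''.join(ans)
-- ===== SOURCE B (Python) =====
-- def stratum2print(stratum):
--     rest = list(stratum)
--     parts = []
--     while rest: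
--         m = max(rest)
--         c = rest.count(m)
--         parts.append(f'{m}' if c == 1 else f'{m}^{c}')
--         rest = [x for x in rest if x != m]
--     return '[' + ','.join(parts) + ']'
-- ===== Notes on version B (the rewrite author's own statement) =====
-- stated objective: alternative
-- what changed: Replaces the Counter + sorted(keys, reverse=True) pass and the trailing-comma-overwrite trick by a selection loop with no sort and no counting dict: repeatedly take max(rest), count its occurrences, filter them out, then ','.join the pieces so the empty input needs no special case; B trades the sort for O(n*k) scanning.
import Mathlib
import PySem

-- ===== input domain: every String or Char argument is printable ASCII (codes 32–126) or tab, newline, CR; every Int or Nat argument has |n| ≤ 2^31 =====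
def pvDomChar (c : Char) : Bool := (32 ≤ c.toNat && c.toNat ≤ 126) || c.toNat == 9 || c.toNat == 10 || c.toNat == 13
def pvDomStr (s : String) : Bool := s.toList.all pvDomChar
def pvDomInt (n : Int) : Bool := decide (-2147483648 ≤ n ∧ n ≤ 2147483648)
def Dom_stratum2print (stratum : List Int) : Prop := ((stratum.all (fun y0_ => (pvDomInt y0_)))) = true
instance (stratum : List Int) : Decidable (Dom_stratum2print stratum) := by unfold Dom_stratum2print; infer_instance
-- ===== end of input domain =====

-- B replaces A's Counter + sorted-keys + trailing-comma overwrite by a selection loop: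
-- repeatedly take the max of what is left, count it, filter all its occurrences out;
-- ','.join of the pieces needs no empty-input special case (alternative algorithm, no sort).


-- ===== PORT A =====
def stratum2print (stratum : List Int) : String :=
  if stratum = [] then "[]"
  else
    let cnt := PySem.Dict.counter stratum
    let ans := (PySem.List.sorted cnt.keys (fun x => x) true).foldl
      (fun (ans : List (List Char)) order =>
        let mult := cnt.getD order 0
        if mult = 1 then ans ++ [PySem.Int.toChars order, [',']]
        else ans ++ [PySem.Int.toChars order ++ '^' :: PySem.Int.toChars mult, [',']])
      [['[']]
    String.ofList (PySem.Chars.join [] (ans.dropLast ++ [[']']]))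

-- ===== PORT B =====
-- Source B's while loop: while rest nonempty, m = max(rest), c = rest.count(m),
-- append the piece to parts and continue with [x for x in rest if x != m]
def pvGoLoop (rest : List Int) (parts : List (List Char)) : List (List Char) :=
  match hm : PySem.List.max? rest (fun x => x) with
  | none => parts   -- `while rest:` exits (max? = none exactly on the empty list)
  | some m =>
    let c : Int := ((PySem.List.count rest m : Nat) : Int)
    pvGoLoop (rest.filter (fun x => !(x == m)))
      (parts ++ [if c = 1 then PySem.Int.toChars m
                 else PySem.Int.toChars m ++ '^' :: PySem.Int.toChars c])
  termination_by rest.length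
  decreasing_by
    simp only [List.length_unattach]
    rw [← List.length_attach (l := rest)]
    refine List.length_filter_lt_length_iff_exists.mpr
      ⟨⟨m, PySem.List.max?_mem hm⟩, List.mem_attach _ _, ?_⟩
    simp

def stratum2print_alt (stratum : List Int) : String :=
  String.ofList ('[' :: PySem.Chars.join [','] (pvGoLoop stratum []) ++ [']'])

-- ===== PRECONDITION & SPEC =====
def Spec_stratum2print (stratum : List Int) (out : String) : Prop := out = stratum2print_alt stratum
instance (stratum : List Int) (out : String) : Decidable (Spec_stratum2print stratum out) := by unfold Spec_stratum2print; infer_instance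

-- ===== CLAIM (what is proved, stated in full; the proofs are below) =====
def Claim_equal_stratum2print : Prop := ∀ (stratum : List Int), Dom_stratum2print stratum → Spec_stratum2print stratum (stratum2print stratum)

-- ===== LEMMAS AND PROOFS =====

-- the sequence of maxima B's loop extracts = the distinct values in descending order
def pvVals (rest : List Int) : List Int :=
  match hm : PySem.List.max? rest (fun x => x) with
  | none => []
  | some m => m :: pvVals (rest.filter (fun x => !(x == m)))
  termination_by rest.length
  decreasing_by
    simp only [List.length_unattach]
    rw [← List.length_attach (l := rest)]
    refine List.length_filter_lt_length_iff_exists.mpr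
      ⟨⟨m, PySem.List.max?_mem hm⟩, List.mem_attach _ _, ?_⟩
    simp

-- unfolding equations for the two well-founded recursions
lemma pvGoLoop_none {rest : List Int} (parts : List (List Char))
    (hm : PySem.List.max? rest (fun x => x) = none) :
    pvGoLoop rest parts = parts := by
  rw [pvGoLoop.eq_def]; split
  · rfl
  · rename_i m h; rw [h] at hm; cases hm

lemma pvGoLoop_some {rest : List Int} {m : Int} (parts : List (List Char))
    (hm : PySem.List.max? rest (fun x => x) = some m) :
    pvGoLoop rest parts =
      pvGoLoop (rest.filter (fun x => !(x == m)))
        (parts ++ [if ((PySem.List.count rest m : Nat) : Int) = 1 then PySem.Int.toChars m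
                   else PySem.Int.toChars m ++ '^' :: PySem.Int.toChars ((PySem.List.count rest m : Nat) : Int)]) := by
  rw [pvGoLoop.eq_def]; split
  · rename_i h; rw [h] at hm; cases hm
  · rename_i m' h; rw [h] at hm; cases hm; simp

lemma pvVals_none {rest : List Int} (hm : PySem.List.max? rest (fun x => x) = none) :
    pvVals rest = [] := by
  rw [pvVals.eq_def]; split
  · rfl
  · rename_i m h; rw [h] at hm; cases hm

lemma pvVals_some {rest : List Int} {m : Int} (hm : PySem.List.max? rest (fun x => x) = some m) :
    pvVals rest = m :: pvVals (rest.filter (fun x => !(x == m))) := by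
  rw [pvVals.eq_def]; split
  · rename_i h; rw [h] at hm; cases hm
  · rename_i m' h; rw [h] at hm; cases hm; simp

lemma mem_pvVals (rest : List Int) (v : Int) : v ∈ pvVals rest ↔ v ∈ rest := by
  induction rest using pvVals.induct with
  | case1 r hm => rw [pvVals_none hm]; simp [(PySem.List.max?_eq_none_iff _ _).mp hm]
  | case2 r m hm ih =>
    simp only [List.unattach_filter, List.unattach_attach] at ih
    rw [pvVals_some hm]
    constructor
    · intro h
      rcases List.mem_cons.mp h with h | h
      · exact h ▸ PySem.List.max?_mem hm
      · exact (List.mem_filter.mp (ih.mp h)).1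
    · intro h
      by_cases hv : v = m
      · simp [hv]
      · exact List.mem_cons_of_mem _ (ih.mpr (List.mem_filter.mpr ⟨h, by simp [hv]⟩))

lemma pvVals_pairwise_gt (rest : List Int) :
    List.Pairwise (fun a b => b < a) (pvVals rest) := by
  induction rest using pvVals.induct with
  | case1 r hm => rw [pvVals_none hm]; exact List.Pairwise.nil
  | case2 r m hm ih =>
    simp only [List.unattach_filter, List.unattach_attach] at ih
    rw [pvVals_some hm, List.pairwise_cons]
    refine ⟨?_, ih⟩
    intro v hv
    have hv' := (mem_pvVals _ v).mp hv
    have h1 : v ≤ m := PySem.List.max?_isMax hm v (List.mem_filter.mp hv').1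
    have h2 : v ≠ m := by
      have := (List.mem_filter.mp hv').2; simpa using this
    exact lt_of_le_of_ne h1 h2

lemma pvVals_nodup (rest : List Int) : (pvVals rest).Nodup :=
  (pvVals_pairwise_gt rest).imp (fun hab => ne_of_gt hab)

-- filter-out of a different value preserves counts
lemma count_filter_ne {m v : Int} (rest : List Int) (hv : v ≠ m) :
    List.count v (rest.filter (fun x => !(x == m))) = List.count v rest := by
  induction rest with
  | nil => rfl
  | cons a t ih =>
    by_cases ha : a = m
    · subst ha
      rw [List.filter_cons_of_neg (by simp)]
      rw [ih, List.count_cons_of_ne (Ne.symm hv)]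
    · rw [List.filter_cons_of_pos (by simp [ha])]
      simp only [List.count_cons, ih]

-- one piece of output, as a function of value and multiplicity
def pvPiece (v m : Int) : List Char :=
  if m = 1 then PySem.Int.toChars v else PySem.Int.toChars v ++ '^' :: PySem.Int.toChars m

lemma pvGoLoop_eq_map (rest : List Int) : ∀ parts : List (List Char),
    pvGoLoop rest parts
      = parts ++ (pvVals rest).map (fun v => pvPiece v ((List.count v rest : Nat) : Int)) := by
  induction rest using pvVals.induct with
  | case1 r hm => intro parts; rw [pvGoLoop_none parts hm, pvVals_none hm]; simp
  | case2 r m hm ih =>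
    intro parts
    simp only [List.unattach_filter, List.unattach_attach] at ih
    rw [pvGoLoop_some parts hm, pvVals_some hm, List.map_cons, ih]
    have hhead : (if ((PySem.List.count r m : Nat) : Int) = 1 then PySem.Int.toChars m
        else PySem.Int.toChars m ++ '^' :: PySem.Int.toChars ((PySem.List.count r m : Nat) : Int))
        = pvPiece m ((List.count m r : Nat) : Int) := by
      simp only [pvPiece, PySem.List.count_eq]
    rw [hhead]
    have htail : (pvVals (r.filter (fun x => !(x == m)))).map
          (fun v => pvPiece v ((List.count v (r.filter (fun x => !(x == m))) : Nat) : Int))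
        = (pvVals (r.filter (fun x => !(x == m)))).map
          (fun v => pvPiece v ((List.count v r : Nat) : Int)) := by
      apply List.map_congr_left
      intro v hv
      have hvm : v ≠ m := by
        have := (List.mem_filter.mp ((mem_pvVals _ v).mp hv)).2; simpa using this
      rw [count_filter_ne r hvm]
    rw [htail]
    simp

lemma sorted_keys_eq_pvVals (stratum : List Int) :
    PySem.List.sorted (PySem.Dict.counter stratum).keys (fun x => x) true
      = pvVals stratum := by
  rw [PySem.Dict.keys_counter]
  apply PySem.List.sorted_rev_eq_of_perm_of_pairwise_gt
  · apply (List.perm_ext_iff_of_nodup (pvVals_nodup _) (PySem.Set.nodup_ofList _)).mpr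
    intro v
    rw [mem_pvVals, PySem.Set.mem_ofList]
  · exact pvVals_pairwise_gt stratum

-- A's generic loop, rewritten as a flatMap over the key list
lemma foldA_eq (keys : List Int) (f : Int → Int) (init : List (List Char)) :
    keys.foldl
      (fun (ans : List (List Char)) order =>
        let mult := f order
        if mult = 1 then ans ++ [PySem.Int.toChars order, [',']]
        else ans ++ [PySem.Int.toChars order ++ '^' :: PySem.Int.toChars mult, [',']])
      init
    = init ++ keys.flatMap (fun v => [pvPiece v (f v), [',']]) := by
  have : (fun (ans : List (List Char)) order =>
        let mult := f order
        if mult = 1 then ans ++ [PySem.Int.toChars order, [',']]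
        else ans ++ [PySem.Int.toChars order ++ '^' :: PySem.Int.toChars mult, [',']])
      = fun ans v => ans ++ [pvPiece v (f v), [',']] := by
    funext ans v
    simp only [pvPiece]
    split_ifs <;> rfl
  rw [this, PySem.List.foldl_append_eq_flatMap]

-- join with the empty separator is flatten
lemma join_nil (xss : List (List Char)) : PySem.Chars.join [] xss = xss.flatten := by
  simp only [PySem.Chars.join, List.intercalate]
  induction xss with
  | nil => rfl
  | cons a t ih =>
    cases t with
    | nil => rfl
    | cons b t' =>
      rw [show List.intersperse ([] : List Char) (a :: b :: t')
            = a :: [] :: List.intersperse [] (b :: t') from rfl]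
      simp only [List.flatten_cons] at ih ⊢
      simp [ih]

-- dropping the trailing comma chunk and flattening yields the comma-intercalation
lemma flatten_dropLast_flatMap (p : List Char) (ps : List (List Char)) :
    ((p :: ps).flatMap (fun q => [q, [',']])).dropLast.flatten
      = List.intercalate [','] (p :: ps) := by
  induction ps generalizing p with
  | nil => simp [List.intercalate]
  | cons q t ih =>
    rw [show ((p :: q :: t).flatMap (fun r => [r, [',']]))
          = p :: [','] :: ((q :: t).flatMap (fun r => [r, [',']])) from rfl]
    have hne : ((q :: t).flatMap (fun r => [r, [',']])) ≠ [] := by simp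
    rw [List.dropLast_cons₂, List.dropLast_cons_of_ne_nil hne]
    simp only [List.flatten_cons]
    rw [ih q]
    rw [show List.intercalate [','] (p :: q :: t)
          = p ++ [','] ++ List.intercalate [','] (q :: t) by
        simp [List.intercalate,
          show List.intersperse [','] (p :: q :: t)
            = p :: [','] :: List.intersperse [','] (q :: t) from rfl]]
    simp

-- the comma/bracket plumbing: overwrite-last-comma + join '' equals '[' + join ',' + ']'
lemma plumbing (ps : List (List Char)) (hps : ps ≠ []) :
    PySem.Chars.join []
      (([['[']] ++ ps.flatMap (fun p => [p, [',']])).dropLast ++ [[']']])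
    = '[' :: PySem.Chars.join [','] ps ++ [']'] := by
  obtain ⟨p, t, rfl⟩ : ∃ p t, ps = p :: t := by
    cases ps with
    | nil => exact absurd rfl hps
    | cons p t => exact ⟨p, t, rfl⟩
  rw [join_nil]
  have hfm : ((p :: t).flatMap (fun q => [q, [',']])) ≠ [] := by simp
  rw [List.dropLast_append_of_ne_nil hfm, List.flatten_append, List.flatten_append]
  simp only [List.flatten_cons, List.flatten_nil]
  rw [flatten_dropLast_flatMap]
  rw [show PySem.Chars.join [','] (p :: t) = List.intercalate [','] (p :: t) from rfl]
  simp

-- ===== VERDICT (by name: the statement is the Claim_ definition above) =====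
theorem stratum2print_spec : Claim_equal_stratum2print := by
  intro stratum _
  unfold Spec_stratum2print
  simp only [stratum2print, stratum2print_alt]
  by_cases hnil : stratum = []
  · subst hnil
    rw [pvGoLoop_none [] (by rw [PySem.List.max?_eq_none_iff])]
    rfl
  · rw [if_neg hnil]
    rw [sorted_keys_eq_pvVals, foldA_eq]
    have hflat : (pvVals stratum).flatMap
        (fun v => [pvPiece v ((PySem.Dict.counter stratum).getD v 0), [',']])
        = (pvVals stratum).flatMap
            (fun v => [pvPiece v ((List.count v stratum : Nat) : Int), [',']]) := by
      apply List.flatMap_congr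
      intro v hv
      rw [PySem.Dict.getD_counter]
    rw [hflat]
    have hmap : (pvVals stratum).flatMap
        (fun v => [pvPiece v ((List.count v stratum : Nat) : Int), [',']])
        = ((pvVals stratum).map
            (fun v => pvPiece v ((List.count v stratum : Nat) : Int))).flatMap
            (fun p => [p, [',']]) := by
      rw [List.flatMap_map]
    rw [hmap]
    rw [pvGoLoop_eq_map stratum [], List.nil_append]
    have hne : (pvVals stratum).map
        (fun v => pvPiece v ((List.count v stratum : Nat) : Int)) ≠ [] := by
      obtain ⟨a, as, hcons⟩ := List.exists_cons_of_ne_nil hnil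
      subst hcons
      rcases h : PySem.List.max? (a :: as) (fun x => x) with _ | m
      · exact absurd ((PySem.List.max?_eq_none_iff _ _).mp h) (List.cons_ne_nil a as)
      · rw [pvVals_some h]; simp
    rw [plumbing _ hne]
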